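-- pv_equiv track=rewrite | github.com/Seiami/cs3050-Lab-6 | lab6_submission/src/task1_2_route_planner.py | highest_priority
-- ===== SOURCE A (Python) =====
-- from typing import Dict, List, Tuple, Optional
--
-- def highest_priority(dests: List[Tuple[int, str]]):
--     '''
--         Helper function for dijkstra.
--         Takes a to-visit destination list and returns a node id and the priority for the first node with highest priority in the list.
--     '''
--     priorities = ["HIGH", "MEDIUM", "LOW"]
--     if dests:
--         for p in priorities:
--             for dest, priority in dests:  # Find the first node with the highest priority
--                 if priority == p:
--                     return dest, priority
--     return None, None
-- ===== SOURCE B (Python) =====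
-- def highest_priority(dests):
--     rank = {"HIGH": 0, "MEDIUM": 1, "LOW": 2}
--     best_rank = 3
--     best_node = None
--     best_priority = None
--     for dest, priority in dests:
--         r = rank.get(priority)
--         if r is not None and r < best_rank:
--             best_rank = r
--             best_node = dest
--             best_priority = priority
--     return best_node, best_priority
-- ===== Notes on version B (the rewrite author's own statement) =====
-- stated objective: simpler
-- what changed: Replaces A's outer loop over priority labels with nested rescans of dests by a single pass that keeps the best (lowest-rank) element seen so far via a rank dictionary; strict '<' preserves first-wins ties and unknown labels are skipped.
import Mathlib
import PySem

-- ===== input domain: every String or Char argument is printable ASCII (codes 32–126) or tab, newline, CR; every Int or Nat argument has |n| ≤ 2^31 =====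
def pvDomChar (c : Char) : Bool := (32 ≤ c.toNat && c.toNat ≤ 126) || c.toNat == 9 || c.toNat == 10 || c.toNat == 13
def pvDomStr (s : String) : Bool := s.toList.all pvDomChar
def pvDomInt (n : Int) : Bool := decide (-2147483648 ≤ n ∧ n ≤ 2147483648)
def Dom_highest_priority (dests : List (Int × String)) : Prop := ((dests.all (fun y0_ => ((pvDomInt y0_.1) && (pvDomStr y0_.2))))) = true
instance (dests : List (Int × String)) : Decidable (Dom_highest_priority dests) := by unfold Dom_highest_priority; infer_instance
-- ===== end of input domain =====

-- B replaces A's outer loop over priority labels (each rescanning dests) by one pass keeping the best-ranked element; return values only, no side effects involved.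

-- ===== PORT A =====
-- inner loop: 'for dest, priority in dests: if priority == p: return dest, priority'
def hpInner (dests : List (Int × String)) (p : String) : Option (Int × String) :=
  match dests with
  | [] => none
  | (dest, priority) :: rest =>
    if priority == p then some (dest, priority) else hpInner rest p

-- outer loop: 'for p in priorities: …'; falling through yields (None, None)
def hpOuter (ps : List String) (dests : List (Int × String)) : Option Int × Option String :=
  match ps with
  | [] => (none, none)
  | p :: rest =>
    match hpInner dests p with
    | some (d, q) => (some d, some q)
    | none => hpOuter rest dests

def highest_priority (dests : List (Int × String)) : Option Int × Option String :=
  if dests.isEmpty then (none, none)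
  else hpOuter ["HIGH", "MEDIUM", "LOW"] dests

-- ===== PORT B =====
def hpRank : PySem.Dict String Int := PySem.Dict.ofList [("HIGH", 0), ("MEDIUM", 1), ("LOW", 2)]

-- one loop step: state = (best_rank, best_node, best_priority)
def hpStep (st : Int × Option Int × Option String) (x : Int × String) :
    Int × Option Int × Option String :=
  match PySem.Dict.get? hpRank x.2 with
  | some r => if r < st.1 then (r, some x.1, some x.2) else st
  | none => st

def highest_priority_alt (dests : List (Int × String)) : Option Int × Option String :=
  let st := dests.foldl hpStep (3, none, none)
  (st.2.1, st.2.2)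

-- ===== PRECONDITION & SPEC =====
def Spec_highest_priority (dests : List (Int × String)) (out : Option Int × Option String) : Prop := out = highest_priority_alt dests
instance (dests : List (Int × String)) (out : Option Int × Option String) : Decidable (Spec_highest_priority dests out) := by unfold Spec_highest_priority; infer_instance

-- ===== CLAIM (what is proved, stated in full; the proofs are below) =====
def Claim_equal_highest_priority : Prop := ∀ (dests : List (Int × String)), Dom_highest_priority dests → Spec_highest_priority dests (highest_priority dests)

-- ===== LEMMAS AND PROOFS =====

-- rank-dict lookup on the three known labels
theorem hpRank_get (q : String) :
    PySem.Dict.get? hpRank q =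
      if q = "HIGH" then some 0 else if q = "MEDIUM" then some 1 else
      if q = "LOW" then some 2 else none := by
  have h : hpRank = PySem.Dict.mk [("HIGH", 0), ("MEDIUM", 1), ("LOW", 2)] := by rfl
  by_cases hH : q = "HIGH"
  · subst hH; decide
  · by_cases hM : q = "MEDIUM"
    · subst hM; decide
    · by_cases hL : q = "LOW"
      · subst hL; decide
      · simp [h, hH, hM, hL, Ne.symm hH, Ne.symm hM, Ne.symm hL, PySem.Dict.get?]

-- rank 0 is unbeatable: the fold leaves the state alone
theorem hpFold_zero (dests : List (Int × String)) (n : Option Int) (p : Option String) :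
    dests.foldl hpStep (0, n, p) = (0, n, p) := by
  induction dests with
  | nil => rfl
  | cons x rest ih =>
    rcases x with ⟨d, q⟩
    by_cases hH : q = "HIGH"
    · simp [hpStep, hpRank_get, hH, ih]
    · by_cases hM : q = "MEDIUM"
      · simp [hpStep, hpRank_get, hM, ih]
      · by_cases hL : q = "LOW"
        · simp [hpStep, hpRank_get, hL, ih]
        · simp [hpStep, hpRank_get, hH, hM, hL, ih]

-- from rank 1 only a HIGH element can improve the state
theorem hpFold_one (dests : List (Int × String)) (n : Option Int) (p : Option String) :
    dests.foldl hpStep (1, n, p) =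
      match hpInner dests "HIGH" with
      | some (d, q) => (0, some d, some q)
      | none => (1, n, p) := by
  induction dests generalizing n p with
  | nil => rfl
  | cons x rest ih =>
    rcases x with ⟨d, q⟩
    by_cases hH : q = "HIGH"
    · simp [hpStep, hpRank_get, hH, hpInner, hpFold_zero]
    · by_cases hM : q = "MEDIUM"
      · simp [hpStep, hpRank_get, hM, hpInner, ih]
      · by_cases hL : q = "LOW"
        · simp [hpStep, hpRank_get, hL, hpInner, ih]
        · simp [hpStep, hpRank_get, hH, hM, hL, hpInner, ih]

-- from rank 2, HIGH then MEDIUM can improve the state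
theorem hpFold_two (dests : List (Int × String)) (n : Option Int) (p : Option String) :
    dests.foldl hpStep (2, n, p) =
      match hpInner dests "HIGH" with
      | some (d, q) => (0, some d, some q)
      | none =>
        match hpInner dests "MEDIUM" with
        | some (d, q) => (1, some d, some q)
        | none => (2, n, p) := by
  induction dests generalizing n p with
  | nil => rfl
  | cons x rest ih =>
    rcases x with ⟨d, q⟩
    by_cases hH : q = "HIGH"
    · simp [hpStep, hpRank_get, hH, hpInner, hpFold_zero]
    · by_cases hM : q = "MEDIUM"
      · simp [hpStep, hpRank_get, hM, hpInner, hpFold_one]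
      · by_cases hL : q = "LOW"
        · simp [hpStep, hpRank_get, hL, hpInner, ih]
        · simp [hpStep, hpRank_get, hH, hM, hL, hpInner, ih]

-- from the initial rank 3, the fold finds the first element of the best existing label
theorem hpFold_three (dests : List (Int × String)) (n : Option Int) (p : Option String) :
    dests.foldl hpStep (3, n, p) =
      match hpInner dests "HIGH" with
      | some (d, q) => (0, some d, some q)
      | none =>
        match hpInner dests "MEDIUM" with
        | some (d, q) => (1, some d, some q)
        | none =>
          match hpInner dests "LOW" with
          | some (d, q) => (2, some d, some q)
          | none => (3, n, p) := by
  induction dests generalizing n p with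
  | nil => rfl
  | cons x rest ih =>
    rcases x with ⟨d, q⟩
    by_cases hH : q = "HIGH"
    · simp [hpStep, hpRank_get, hH, hpInner, hpFold_zero]
    · by_cases hM : q = "MEDIUM"
      · simp [hpStep, hpRank_get, hM, hpInner, hpFold_one]
      · by_cases hL : q = "LOW"
        · simp [hpStep, hpRank_get, hL, hpInner, hpFold_two]
        · simp [hpStep, hpRank_get, hH, hM, hL, hpInner, ih]

-- ===== VERDICT (by name: the statement is the Claim_ definition above) =====
theorem highest_priority_spec : Claim_equal_highest_priority := by
  intro dests _
  unfold Spec_highest_priority highest_priority highest_priority_alt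
  rw [hpFold_three]
  cases dests with
  | nil => rfl
  | cons x rest =>
    simp only [List.isEmpty_cons, if_neg (by decide : ¬ (false = true)), hpOuter]
    rcases h1 : hpInner (x :: rest) "HIGH" with _ | ⟨d, q⟩ <;>
      rcases h2 : hpInner (x :: rest) "MEDIUM" with _ | ⟨d2, q2⟩ <;>
        rcases h3 : hpInner (x :: rest) "LOW" with _ | ⟨d3, q3⟩ <;> rfl
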